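-- pv_equiv track=rewrite | github.com/titiman1013/Algorithm | 21.04.13/Programmers_77485.py | solution
-- ===== SOURCE A (Python) =====
-- def create_arr(rows, columns):
--     num = 0
--     arr = [[0] * columns for _ in range(rows)]
--     for i in range(rows):
--         for j in range(columns):
--             num += 1
--             arr[i][j] = num
--     return arr
--
-- def rotate(arr, x1, x2, y1, y2):
--     num_lst = [arr[x1 - 1][y1 - 1]]
--     for i in range(y1, y2):
--         num_lst.append(arr[x1 - 1][i])
--         arr[x1 - 1][i] = num_lst[-2]
--     for i in range(x1, x2):
--         num_lst.append(arr[i][y2 - 1])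
--         arr[i][y2 - 1] = num_lst[-2]
--     for i in range(y2 - 2, y1 - 2, -1):
--         num_lst.append(arr[x2 - 1][i])
--         arr[x2 - 1][i] = num_lst[-2]
--     for i in range(x2 - 2, x1 - 2, -1):
--         num_lst.append(arr[i][y1 - 1])
--         arr[i][y1 - 1] = num_lst[-2]
--     return arr, min(num_lst)
--
-- def solution(rows, columns, queries):
--     answer = []
--
--     arr = create_arr(rows, columns)
--
--     for querie in queries:
--         x1, y1, x2, y2 = querie
--         arr, min_num = rotate(arr, x1, x2, y1, y2)
--         answer.append(min_num)
--
--     return answer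
-- ===== SOURCE B (Python) =====
-- def solution(rows, columns, queries):
--     # build the numbered grid row by row with a closed-form range per row
--     grid = [list(range(r * columns + 1, r * columns + columns + 1)) for r in range(rows)]
--     answer = []
--     for querie in queries:
--         x1, y1, x2, y2 = querie
--         r1, c1, r2, c2 = x1 - 1, y1 - 1, x2 - 1, y2 - 1
--         # clockwise border path starting at the top-left corner, each cell once
--         path = [(r1, c) for c in range(c1, c2)]
--         path += [(r, c2) for r in range(r1, r2)]
--         path += [(r2, c) for c in range(c2, c1, -1)]
--         path += [(r, c1) for r in range(r2, r1, -1)]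
--         vals = [grid[r][c] for r, c in path]
--         answer.append(min(vals))
--         rotated = vals[-1:] + vals[:-1]
--         for (r, c), v in zip(path, rotated):
--             grid[r][c] = v
--     return answer
-- ===== Notes on version B (the rewrite author's own statement) =====
-- stated objective: alternative
-- what changed: Per query, instead of four interleaved read/overwrite loops threading a growing num_lst and taking min at the end, B collects the border values along one clockwise path, answers min(vals), and writes the rotated list (vals[-1:]+vals[:-1]) back along the same path; the grid is built with one closed-form range per row instead of a counter loop.
-- outside the precondition, e.g. on solution(3, 4, [[1, 1, 1, 3], [1, 1, 3, 4]]): A returns [1, 1], B returns [1, 2]; on solution(3, 3, [[0, 1, 3, 3], [1, 1, 3, 3]]): A returns [1, 1], B returns [1, 2]; on solution(5, 5, [[3, 4, 5, 2], [1, 5, 5, 1]]): A returns [14, 5], B returns [12, 1]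
import Mathlib
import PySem

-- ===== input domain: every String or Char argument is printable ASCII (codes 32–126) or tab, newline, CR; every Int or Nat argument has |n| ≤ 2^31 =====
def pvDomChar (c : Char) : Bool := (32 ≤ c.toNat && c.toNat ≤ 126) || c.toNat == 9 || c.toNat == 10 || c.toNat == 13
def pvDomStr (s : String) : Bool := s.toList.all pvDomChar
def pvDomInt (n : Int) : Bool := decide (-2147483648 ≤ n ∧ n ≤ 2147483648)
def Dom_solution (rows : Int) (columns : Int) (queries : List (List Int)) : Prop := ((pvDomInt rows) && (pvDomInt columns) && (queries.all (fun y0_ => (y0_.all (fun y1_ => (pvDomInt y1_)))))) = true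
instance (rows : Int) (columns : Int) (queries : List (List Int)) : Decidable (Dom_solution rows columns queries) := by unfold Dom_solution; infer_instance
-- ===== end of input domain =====

-- B rewrites A: per query it collects the border values along one clockwise path, answers
-- min(vals) and writes the rotated value list back along the same path, instead of A's four
-- interleaved read/overwrite loops threading a growing num_lst; the grid is built with one
-- closed-form range per row instead of a counter loop.  Objective: alternative (same cost).
-- Both Pythons mutate no caller-visible argument (the grid is local), so full-value equivalence is claimed.

-- ===== PORT A =====
-- arr[r][c]  (both Pythons read/assign grid cells this way; indices are ≥ 0 under Pre_)
def pvRead (g : List (List Int)) (r c : Int) : Int :=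
  PySem.List.pyGetD (PySem.List.pyGetD g r []) c 0

-- arr[r][c] = v
def pvWrite (g : List (List Int)) (r c : Int) (v : Int) : List (List Int) :=
  PySem.List.pySetD g r (PySem.List.pySetD (PySem.List.pyGetD g r []) c v)

def create_arr (rows columns : Int) : List (List Int) :=
  let arr := (PySem.List.pyRange 0 rows).map (fun _ => PySem.List.pyRepeat [0] columns)
  ((PySem.List.pyRange 0 rows).foldl
    (fun (s : Int × List (List Int)) i =>
      (PySem.List.pyRange 0 columns).foldl
        (fun (t : Int × List (List Int)) j =>
          (t.1 + 1, pvWrite t.2 i j (t.1 + 1))) s)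
    (0, arr)).2

def rotate (arr : List (List Int)) (x1 x2 y1 y2 : Int) : List (List Int) × Int :=
  let s0 : List (List Int) × List Int := (arr, [pvRead arr (x1 - 1) (y1 - 1)])
  let s1 := (PySem.List.pyRange y1 y2).foldl
    (fun (s : List (List Int) × List Int) i =>
      let lst := s.2 ++ [pvRead s.1 (x1 - 1) i]
      (pvWrite s.1 (x1 - 1) i (PySem.List.pyGetD lst (-2) 0), lst)) s0
  let s2 := (PySem.List.pyRange x1 x2).foldl
    (fun (s : List (List Int) × List Int) i =>
      let lst := s.2 ++ [pvRead s.1 i (y2 - 1)]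
      (pvWrite s.1 i (y2 - 1) (PySem.List.pyGetD lst (-2) 0), lst)) s1
  let s3 := (PySem.List.pyRange (y2 - 2) (y1 - 2) (-1)).foldl
    (fun (s : List (List Int) × List Int) i =>
      let lst := s.2 ++ [pvRead s.1 (x2 - 1) i]
      (pvWrite s.1 (x2 - 1) i (PySem.List.pyGetD lst (-2) 0), lst)) s2
  let s4 := (PySem.List.pyRange (x2 - 2) (x1 - 2) (-1)).foldl
    (fun (s : List (List Int) × List Int) i =>
      let lst := s.2 ++ [pvRead s.1 i (y1 - 1)]
      (pvWrite s.1 i (y1 - 1) (PySem.List.pyGetD lst (-2) 0), lst)) s3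
  (s4.1, (PySem.List.min? s4.2 (fun v => v)).getD 0)

def solution (rows : Int) (columns : Int) (queries : List (List Int)) : List Int :=
  (queries.foldl
    (fun (s : List Int × List (List Int)) querie =>
      let x1 := PySem.List.pyGetD querie 0 0
      let y1 := PySem.List.pyGetD querie 1 0
      let x2 := PySem.List.pyGetD querie 2 0
      let y2 := PySem.List.pyGetD querie 3 0
      let r := rotate s.2 x1 x2 y1 y2
      (s.1 ++ [r.2], r.1))
    ([], create_arr rows columns)).1

-- ===== PORT B =====
def pvGridAlt (rows columns : Int) : List (List Int) :=
  (PySem.List.pyRange 0 rows).map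
    (fun r => PySem.List.pyRange (r * columns + 1) (r * columns + columns + 1))

-- the clockwise border path, each cell exactly once, starting at the top-left corner
def pvPath (x1 y1 x2 y2 : Int) : List (Int × Int) :=
  (PySem.List.pyRange (y1 - 1) (y2 - 1)).map (fun c => (x1 - 1, c)) ++
  (PySem.List.pyRange (x1 - 1) (x2 - 1)).map (fun r => (r, y2 - 1)) ++
  (PySem.List.pyRange (y2 - 1) (y1 - 1) (-1)).map (fun c => (x2 - 1, c)) ++
  (PySem.List.pyRange (x2 - 1) (x1 - 1) (-1)).map (fun r => (r, y1 - 1))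

def solution_alt (rows : Int) (columns : Int) (queries : List (List Int)) : List Int :=
  (queries.foldl
    (fun (s : List Int × List (List Int)) querie =>
      let x1 := PySem.List.pyGetD querie 0 0
      let y1 := PySem.List.pyGetD querie 1 0
      let x2 := PySem.List.pyGetD querie 2 0
      let y2 := PySem.List.pyGetD querie 3 0
      let path := pvPath x1 y1 x2 y2
      let vals := path.map (fun p => pvRead s.2 p.1 p.2)
      let mn := (PySem.List.min? vals (fun v => v)).getD 0
      let rotated := PySem.List.slice vals (some (-1)) none ++ PySem.List.slice vals none (some (-1))
      (s.1 ++ [mn],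
       (path.zip rotated).foldl (fun g pc => pvWrite g pc.1.1 pc.1.2 pc.2) s.2))
    ([], pvGridAlt rows columns)).1

-- ===== PRECONDITION & SPEC =====
def pvQueryOK (rows columns : Int) (q : List Int) : Prop :=
  q.length = 4 ∧ 1 ≤ q.getD 0 0 ∧ q.getD 0 0 < q.getD 2 0 ∧ q.getD 2 0 ≤ rows ∧
  1 ≤ q.getD 1 0 ∧ q.getD 1 0 < q.getD 3 0 ∧ q.getD 3 0 ≤ columns

-- Pre_ keeps exactly the queries the original problem guarantees (1 ≤ x1 < x2 ≤ rows,
-- 1 ≤ y1 < y2 ≤ columns, four entries): outside that A either raises (IndexError /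
-- unpack ValueError) or returns values produced by Python negative-index wraparound or by
-- double-overwriting a degenerate (single-row/column or reversed) border, accidents of A's
-- write order that B does not reproduce (B may even raise min([]) there).
def Pre_solution (rows : Int) (columns : Int) (queries : List (List Int)) : Prop :=
  ∀ q ∈ queries, pvQueryOK rows columns q

instance (rows : Int) (columns : Int) (queries : List (List Int)) : Decidable (Pre_solution rows columns queries) := by
  unfold Pre_solution pvQueryOK; infer_instance

def pvWitness_solution : Int × Int × List (List Int) := (2, 2, [[1, 1, 2, 2]])

def Spec_solution (rows : Int) (columns : Int) (queries : List (List Int)) (out : List Int) : Prop := out = solution_alt rows columns queries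
instance (rows : Int) (columns : Int) (queries : List (List Int)) (out : List Int) : Decidable (Spec_solution rows columns queries out) := by unfold Spec_solution; infer_instance

-- ===== CLAIM (what is proved, stated in full; the proofs are below) =====
def Claim_equal_solution : Prop := ∀ (rows : Int) (columns : Int) (queries : List (List Int)), Dom_solution rows columns queries → Pre_solution rows columns queries → Spec_solution rows columns queries (solution rows columns queries)

-- ===== LEMMAS AND PROOFS =====

-- well-formed grid: rows.toNat rows, each of length columns.toNat
def pvWf (rows columns : Int) (g : List (List Int)) : Prop :=
  g.length = rows.toNat ∧ ∀ row ∈ g, row.length = columns.toNat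

-- a cell is inside the grid
def pvInG (rows columns : Int) (p : Int × Int) : Prop :=
  0 ≤ p.1 ∧ p.1 < rows ∧ 0 ≤ p.2 ∧ p.2 < columns

-- A's loop body, as a step over a coordinate pair
def pvStep (s : List (List Int) × List Int) (p : Int × Int) : List (List Int) × List Int :=
  let lst := s.2 ++ [pvRead s.1 p.1 p.2]
  (pvWrite s.1 p.1 p.2 (PySem.List.pyGetD lst (-2) 0), lst)

-- batch writer (B's write-back loop body)
def pvWr (g : List (List Int)) (pc : (Int × Int) × Int) : List (List Int) :=
  pvWrite g pc.1.1 pc.1.2 pc.2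

-- xs[i] with 0 ≤ i beyond the length reads the default
theorem pv_getD_oob {α : Type} (xs : List α) (i : Int) (d : α)
    (_h0 : 0 ≤ i) (h : (xs.length : Int) ≤ i) : PySem.List.pyGetD xs i d = d := by
  apply PySem.List.pyGetD_of_none
  rw [PySem.List.pyGet?_eq_none_iff]
  intro ⟨_, hlt⟩; omega

-- reading at a nonnegative index other than the set one
theorem pv_getD_set_ne {α : Type} (xs : List α) (n : Nat) (v d : α) (i : Int)
    (hi : 0 ≤ i) (hne : i ≠ (n : Int)) :
    PySem.List.pyGetD (xs.set n v) i d = PySem.List.pyGetD xs i d := by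
  by_cases hlt : i < (xs.length : Int)
  · rw [PySem.List.pyGetD_eq_getElem _ _ hi (by simpa using hlt),
        PySem.List.pyGetD_eq_getElem _ _ hi hlt]
    exact List.getElem_set_ne (by omega) _
  · rw [pv_getD_oob _ _ _ hi (by simp at hlt ⊢; omega),
        pv_getD_oob _ _ _ hi (by omega)]

-- num_lst[-2] right after an append is the previous last element
theorem pv_last (lst : List Int) (v : Int) (h : lst ≠ []) :
    PySem.List.pyGetD (lst ++ [v]) (-2) 0 = lst.getLastD 0 := by
  have hlen : 2 ≤ (lst ++ [v]).length := by
    simp [List.length_append]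
    exact Nat.one_le_iff_ne_zero.mpr (by simpa using h)
  rw [PySem.List.pyGetD_neg_ofNat (lst ++ [v]) 2 0 (by omega) hlen]
  have h1 : (lst ++ [v]).length - 2 = lst.length - 1 := by simp
  have h2 : lst.length - 1 < lst.length := by
    have := List.length_pos_iff.mpr h; omega
  rw [List.getElem_append_left (by simpa [h1] using h2)]
  rw [List.getLastD_eq_getLast? , List.getLast?_eq_getElem?]
  simp [List.getElem?_eq_getElem h2]

theorem pv_write_wf (rows columns : Int) (g : List (List Int)) (r c v : Int)
    (hwf : pvWf rows columns g) (hr : 0 ≤ r) (hrlt : r < rows) :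
    pvWf rows columns (pvWrite g r c v) := by
  obtain ⟨hl, hrow⟩ := hwf
  have hrl : r < (g.length : Int) := by omega
  rw [pvWrite, PySem.List.pySetD_of_nonneg _ _ hr]
  constructor
  · simp [hl]
  · intro row hmem
    rcases List.mem_or_eq_of_mem_set hmem with h | h
    · exact hrow _ h
    · subst h
      rw [PySem.List.length_pySetD]
      exact hrow _ (PySem.List.pyGetD_mem _ _ ⟨by omega, hrl⟩)

theorem pv_read_write_ne (rows columns : Int) (g : List (List Int)) (r c v r' c' : Int)
    (hwf : pvWf rows columns g) (h : pvInG rows columns (r, c))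
    (hr' : 0 ≤ r') (hc' : 0 ≤ c') (hne : (r', c') ≠ (r, c)) :
    pvRead (pvWrite g r c v) r' c' = pvRead g r' c' := by
  obtain ⟨hl, hrow⟩ := hwf
  obtain ⟨h1, h2, h3, h4⟩ := h
  simp only [] at h1 h2 h3 h4
  have hrl : r < (g.length : Int) := by omega
  rw [pvWrite, PySem.List.pySetD_of_nonneg _ _ h1]
  by_cases hrr : r' = r
  · have hcc : c' ≠ c := fun hc => hne (by rw [hrr, hc])
    rw [pvRead, pvRead]
    have e1 : PySem.List.pyGetD (g.set r.toNat (PySem.List.pySetD (PySem.List.pyGetD g r []) c v)) r' []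
        = PySem.List.pySetD (PySem.List.pyGetD g r []) c v := by
      rw [hrr, PySem.List.pyGetD_eq_getElem _ _ h1 (by simpa using hrl), List.getElem_set_self]
    rw [e1, PySem.List.pySetD_of_nonneg _ _ h3, pv_getD_set_ne _ _ _ _ _ hc' (by omega), hrr]
  · rw [pvRead, pvRead, pv_getD_set_ne _ _ _ _ _ hr' (by omega)]

theorem pv_write_comm (rows columns : Int) (g : List (List Int)) (r1 c1 v1 r2 c2 v2 : Int)
    (hwf : pvWf rows columns g)
    (h1 : pvInG rows columns (r1, c1)) (h2 : pvInG rows columns (r2, c2))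
    (hne : (r1, c1) ≠ (r2, c2)) :
    pvWrite (pvWrite g r1 c1 v1) r2 c2 v2 = pvWrite (pvWrite g r2 c2 v2) r1 c1 v1 := by
  obtain ⟨hl, hrow⟩ := hwf
  obtain ⟨a1, a2, a3, a4⟩ := h1
  obtain ⟨b1, b2, b3, b4⟩ := h2
  simp only [] at a1 a2 a3 a4 b1 b2 b3 b4
  have hr1 : r1 < (g.length : Int) := by omega
  have hr2 : r2 < (g.length : Int) := by omega
  by_cases hrr : r1 = r2
  · subst hrr
    have hcc : c1.toNat ≠ c2.toNat := by
      intro h; apply hne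
      have : c1 = c2 := by omega
      rw [this]
    simp only [pvWrite]
    rw [PySem.List.pySetD_of_nonneg _ _ a1, PySem.List.pySetD_of_nonneg _ _ a1,
        PySem.List.pySetD_of_nonneg _ _ a1, PySem.List.pySetD_of_nonneg _ _ a1]
    have eX : ∀ X : List Int, PySem.List.pyGetD (g.set r1.toNat X) r1 [] = X := by
      intro X
      rw [PySem.List.pyGetD_eq_getElem _ _ a1 (by simpa using hr1), List.getElem_set_self]
    rw [eX, eX, List.set_set, List.set_set,
        PySem.List.pySetD_of_nonneg _ _ a3, PySem.List.pySetD_of_nonneg _ _ b3,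
        PySem.List.pySetD_of_nonneg _ _ a3, PySem.List.pySetD_of_nonneg _ _ b3,
        List.set_comm _ _ hcc]
  · have hnn : r1.toNat ≠ r2.toNat := by omega
    simp only [pvWrite, PySem.List.pySetD_of_nonneg _ _ a1, PySem.List.pySetD_of_nonneg _ _ b1]
    rw [pv_getD_set_ne _ _ _ _ _ b1 (by omega), pv_getD_set_ne _ _ _ _ _ a1 (by omega),
        List.set_comm _ _ hnn]

theorem pv_foldl_wr_wf (rows columns : Int) (pcs : List ((Int × Int) × Int)) (g : List (List Int))
    (hwf : pvWf rows columns g) (hin : ∀ pc ∈ pcs, pvInG rows columns pc.1) :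
    pvWf rows columns (pcs.foldl pvWr g) := by
  induction pcs generalizing g with
  | nil => exact hwf
  | cons pc t ih =>
    have h := hin pc (by simp)
    exact ih (pvWrite g pc.1.1 pc.1.2 pc.2)
      (pv_write_wf _ _ _ _ _ _ hwf h.1 h.2.1)
      (fun q hq => hin q (by simp [hq]))

-- a batch of writes to distinct in-range cells: the last write can be moved to the front
theorem pv_foldl_wr_rot (rows columns : Int) (ys : List ((Int × Int) × Int)) (x : (Int × Int) × Int)
    (g : List (List Int)) (hwf : pvWf rows columns g)
    (hin : ∀ pc ∈ x :: ys, pvInG rows columns pc.1)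
    (hnd : ((x :: ys).map (fun pc => pc.1)).Nodup) :
    (ys ++ [x]).foldl pvWr g = (x :: ys).foldl pvWr g := by
  induction ys generalizing g with
  | nil => rfl
  | cons y t ih =>
    have hxy : x.1 ≠ y.1 := by
      simp only [List.map_cons, List.nodup_cons, List.mem_cons] at hnd
      exact fun h => hnd.1 (Or.inl h)
    have hinx := hin x (by simp)
    have hiny := hin y (by simp)
    have swap : pvWr (pvWr g y) x = pvWr (pvWr g x) y := by
      simp only [pvWr]
      exact pv_write_comm _ _ _ _ _ _ _ _ _ hwf
        ⟨hiny.1, hiny.2.1, hiny.2.2.1, hiny.2.2.2⟩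
        ⟨hinx.1, hinx.2.1, hinx.2.2.1, hinx.2.2.2⟩
        (fun h => hxy h.symm)
    have hnd' : ((x :: t).map (fun pc => pc.1)).Nodup := by
      simp only [List.map_cons, List.nodup_cons, List.mem_cons] at hnd ⊢
      exact ⟨fun h => hnd.1 (Or.inr h), hnd.2.2⟩
    have hin' : ∀ pc ∈ x :: t, pvInG rows columns pc.1 := by
      intro pc hpc
      rcases List.mem_cons.mp hpc with h | h
      · exact hin pc (by simp [h])
      · exact hin pc (by simp [h])
    calc ((y :: t) ++ [x]).foldl pvWr g
        = (t ++ [x]).foldl pvWr (pvWr g y) := rfl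
      _ = (x :: t).foldl pvWr (pvWr g y) := by
          exact ih (pvWr g y)
            (pv_write_wf _ _ _ _ _ _ hwf hiny.1 hiny.2.1) hin' hnd'
      _ = t.foldl pvWr (pvWr (pvWr g y) x) := rfl
      _ = t.foldl pvWr (pvWr (pvWr g x) y) := by rw [swap]
      _ = (x :: y :: t).foldl pvWr g := rfl

-- A's interleaved read/overwrite loop over distinct cells = batch write of the shifted reads
theorem pv_shift_fold (rows columns : Int) (W : List (Int × Int)) (g : List (List Int)) (lst : List Int)
    (hwf : pvWf rows columns g) (hl : lst ≠ []) (hnd : W.Nodup)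
    (hin : ∀ p ∈ W, pvInG rows columns p) :
    W.foldl pvStep (g, lst) =
      ((W.zip (lst.getLastD 0 :: W.map (fun p => pvRead g p.1 p.2))).foldl pvWr g,
        lst ++ W.map (fun p => pvRead g p.1 p.2)) := by
  induction W generalizing g lst with
  | nil => simp
  | cons p T ih =>
    have hp := hin p (by simp)
    have hstep : pvStep (g, lst) p =
        (pvWrite g p.1 p.2 (lst.getLastD 0), lst ++ [pvRead g p.1 p.2]) := by
      simp only [pvStep]
      rw [pv_last _ _ hl]
    set g1 := pvWrite g p.1 p.2 (lst.getLastD 0) with hg1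
    have hwf1 : pvWf rows columns g1 := pv_write_wf _ _ _ _ _ _ hwf hp.1 hp.2.1
    have hreads : T.map (fun q => pvRead g1 q.1 q.2) = T.map (fun q => pvRead g q.1 q.2) := by
      apply List.map_congr_left
      intro q hq
      have hqin := hin q (by simp [hq])
      have hqp : (q.1, q.2) ≠ (p.1, p.2) := by
        intro h
        have : q = p := Prod.ext (congrArg Prod.fst h) (congrArg Prod.snd h)
        rw [List.nodup_cons] at hnd
        exact hnd.1 (this ▸ hq)
      exact pv_read_write_ne _ _ _ _ _ _ _ _ hwf hp hqin.1 hqin.2.2.1 hqp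
    have hlast1 : (lst ++ [pvRead g p.1 p.2]).getLastD 0 = pvRead g p.1 p.2 := by
      simp [List.getLastD_eq_getLast?]
    calc (p :: T).foldl pvStep (g, lst)
        = T.foldl pvStep (g1, lst ++ [pvRead g p.1 p.2]) := by rw [List.foldl_cons, hstep]
      _ = ((T.zip ((lst ++ [pvRead g p.1 p.2]).getLastD 0 :: T.map (fun q => pvRead g1 q.1 q.2))).foldl pvWr g1,
            (lst ++ [pvRead g p.1 p.2]) ++ T.map (fun q => pvRead g1 q.1 q.2)) := by
          exact ih g1 (lst ++ [pvRead g p.1 p.2]) hwf1 (by simp) (List.Nodup.of_cons hnd)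
            (fun q hq => hin q (by simp [hq]))
      _ = (((p :: T).zip (lst.getLastD 0 :: (p :: T).map (fun q => pvRead g q.1 q.2))).foldl pvWr g,
            lst ++ (p :: T).map (fun q => pvRead g q.1 q.2)) := by
          rw [hreads, hlast1]
          simp only [List.map_cons, List.zip_cons_cons, List.foldl_cons, List.append_assoc,
            List.singleton_append]
          rfl

-- a countdown range splits its last element off
theorem pv_range_neg_snoc {a b : Int} (h : b < a) :
    PySem.List.pyRange a b (-1) = PySem.List.pyRange a (b + 1) (-1) ++ [b + 1] := by
  rw [PySem.List.pyRange_neg_one_eq_reverse a b, PySem.List.pyRange_one_cons (by omega),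
      List.reverse_cons, PySem.List.pyRange_neg_one_eq_reverse a (b + 1)]

theorem pv_range_neg_nodup (a b : Int) : (PySem.List.pyRange a b (-1)).Nodup := by
  rw [PySem.List.pyRange_neg_one_eq_reverse]
  exact List.nodup_reverse.mpr (PySem.List.nodup_pyRange_one _ _)

-- the tail of B's path
def pvQ (x1 y1 x2 y2 : Int) : List (Int × Int) :=
  (PySem.List.pyRange y1 (y2 - 1)).map (fun i => ((x1 - 1 : Int), i)) ++
  ((x1 - 1, y2 - 1) :: ((PySem.List.pyRange x1 (x2 - 1)).map (fun i => (i, (y2 - 1 : Int))) ++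
   ((x2 - 1, y2 - 1) :: ((PySem.List.pyRange (y2 - 2) (y1 - 1) (-1)).map (fun i => ((x2 - 1 : Int), i)) ++
    ((x2 - 1, y1 - 1) :: (PySem.List.pyRange (x2 - 2) (x1 - 1) (-1)).map (fun i => (i, (y1 - 1 : Int))))))))

theorem pvQ_ne_nil (x1 y1 x2 y2 : Int) : pvQ x1 y1 x2 y2 ≠ [] := by
  simp [pvQ]

theorem pv_path_eq (x1 y1 x2 y2 : Int) (hx : x1 < x2) (hy : y1 < y2) :
    pvPath x1 y1 x2 y2 = (x1 - 1, y1 - 1) :: pvQ x1 y1 x2 y2 := by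
  have e1 : PySem.List.pyRange (y1 - 1) (y2 - 1) = (y1 - 1) :: PySem.List.pyRange y1 (y2 - 1) := by
    rw [PySem.List.pyRange_one_cons (by omega)]; norm_num
  have e2 : PySem.List.pyRange (x1 - 1) (x2 - 1) = (x1 - 1) :: PySem.List.pyRange x1 (x2 - 1) := by
    rw [PySem.List.pyRange_one_cons (by omega)]; norm_num
  have e3 : PySem.List.pyRange (y2 - 1) (y1 - 1) (-1) = (y2 - 1) :: PySem.List.pyRange (y2 - 2) (y1 - 1) (-1) := by
    have h : y2 - 1 - 1 = y2 - 2 := by ring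
    rw [PySem.List.pyRange_neg_one_cons (by omega), h]
  have e4 : PySem.List.pyRange (x2 - 1) (x1 - 1) (-1) = (x2 - 1) :: PySem.List.pyRange (x2 - 2) (x1 - 1) (-1) := by
    have h : x2 - 1 - 1 = x2 - 2 := by ring
    rw [PySem.List.pyRange_neg_one_cons (by omega), h]
  rw [pvPath, e1, e2, e3, e4, pvQ]
  simp [List.append_assoc]

theorem pv_wa_eq (x1 y1 x2 y2 : Int) (hx : x1 < x2) (hy : y1 < y2) :
    (PySem.List.pyRange y1 y2).map (fun i => ((x1 - 1 : Int), i)) ++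
      ((PySem.List.pyRange x1 x2).map (fun i => (i, (y2 - 1 : Int))) ++
       ((PySem.List.pyRange (y2 - 2) (y1 - 2) (-1)).map (fun i => ((x2 - 1 : Int), i)) ++
        (PySem.List.pyRange (x2 - 2) (x1 - 2) (-1)).map (fun i => (i, (y1 - 1 : Int))))) =
    pvQ x1 y1 x2 y2 ++ [(x1 - 1, y1 - 1)] := by
  have e1 : PySem.List.pyRange y1 y2 = PySem.List.pyRange y1 (y2 - 1) ++ [y2 - 1] := by
    have h : y2 = (y2 - 1) + 1 := by ring
    rw [h, PySem.List.pyRange_one_succ_right (by omega)]; norm_num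
  have e2 : PySem.List.pyRange x1 x2 = PySem.List.pyRange x1 (x2 - 1) ++ [x2 - 1] := by
    have h : x2 = (x2 - 1) + 1 := by ring
    rw [h, PySem.List.pyRange_one_succ_right (by omega)]; norm_num
  have e3 : PySem.List.pyRange (y2 - 2) (y1 - 2) (-1) =
      PySem.List.pyRange (y2 - 2) (y1 - 1) (-1) ++ [y1 - 1] := by
    have h := pv_range_neg_snoc (a := y2 - 2) (b := y1 - 2) (by omega)
    have h2 : y1 - 2 + 1 = y1 - 1 := by ring
    rw [h, h2]
  have e4 : PySem.List.pyRange (x2 - 2) (x1 - 2) (-1) =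
      PySem.List.pyRange (x2 - 2) (x1 - 1) (-1) ++ [x1 - 1] := by
    have h := pv_range_neg_snoc (a := x2 - 2) (b := x1 - 2) (by omega)
    have h2 : x1 - 2 + 1 = x1 - 1 := by ring
    rw [h, h2]
  rw [e1, e2, e3, e4, pvQ]
  simp [List.append_assoc]

theorem pv_path_inG (rows columns x1 y1 x2 y2 : Int)
    (hx1 : 1 ≤ x1) (hx : x1 < x2) (hx2 : x2 ≤ rows)
    (hy1 : 1 ≤ y1) (hy : y1 < y2) (hy2 : y2 ≤ columns) :
    ∀ p ∈ pvPath x1 y1 x2 y2, pvInG rows columns p := by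
  intro p hp
  simp only [pvPath, List.mem_append, List.mem_map] at hp
  rcases hp with ((⟨i, hi, rfl⟩ | ⟨i, hi, rfl⟩) | ⟨i, hi, rfl⟩) | ⟨i, hi, rfl⟩ <;>
    first
      | (rw [PySem.List.mem_pyRange_one] at hi; exact ⟨by omega, by omega, by omega, by omega⟩)
      | (rw [PySem.List.mem_pyRange_neg_one] at hi; exact ⟨by omega, by omega, by omega, by omega⟩)

theorem pv_path_nodup (x1 y1 x2 y2 : Int) (hx : x1 < x2) (hy : y1 < y2) :
    (pvPath x1 y1 x2 y2).Nodup := by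
  have injc1 : Function.Injective (fun c : Int => ((x1 - 1 : Int), c)) := by
    intro a b h; simpa using h
  have injc2 : Function.Injective (fun c : Int => ((x2 - 1 : Int), c)) := by
    intro a b h; simpa using h
  have injr1 : Function.Injective (fun r : Int => (r, (y2 - 1 : Int))) := by
    intro a b h; simpa using h
  have injr2 : Function.Injective (fun r : Int => (r, (y1 - 1 : Int))) := by
    intro a b h; simpa using h
  have nA := (PySem.List.nodup_pyRange_one (y1 - 1) (y2 - 1)).map injc1
  have nB := (PySem.List.nodup_pyRange_one (x1 - 1) (x2 - 1)).map injr1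
  have nC := (pv_range_neg_nodup (y2 - 1) (y1 - 1)).map injc2
  have nD := (pv_range_neg_nodup (x2 - 1) (x1 - 1)).map injr2
  rw [pvPath]
  rw [List.nodup_append, List.nodup_append, List.nodup_append]
  refine ⟨⟨⟨nA, nB, ?_⟩, nC, ?_⟩, nD, ?_⟩
  · intro p hp q hq hpq
    simp only [List.mem_map] at hp hq
    obtain ⟨i, hi, rfl⟩ := hp
    obtain ⟨j, hj, hji⟩ := hq
    rw [PySem.List.mem_pyRange_one] at hi hj
    have h2 := congrArg Prod.snd (hpq.trans hji.symm)
    simp only at h2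
    omega
  · intro p hp q hq hpq
    simp only [List.mem_map] at hq
    obtain ⟨j, hj, hji⟩ := hq
    rw [PySem.List.mem_pyRange_neg_one] at hj
    rcases List.mem_append.mp hp with hp | hp <;> simp only [List.mem_map] at hp <;>
      obtain ⟨i, hi, rfl⟩ := hp
    · rw [PySem.List.mem_pyRange_one] at hi
      have h1 := congrArg Prod.fst (hpq.trans hji.symm)
      simp only at h1
      omega
    · rw [PySem.List.mem_pyRange_one] at hi
      have h1 := congrArg Prod.fst (hpq.trans hji.symm)
      simp only at h1
      omega
  · intro p hp q hq hpq
    simp only [List.mem_map] at hq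
    obtain ⟨j, hj, hji⟩ := hq
    rw [PySem.List.mem_pyRange_neg_one] at hj
    rcases List.mem_append.mp hp with hp | hp
    · rcases List.mem_append.mp hp with hp | hp <;> simp only [List.mem_map] at hp <;>
        obtain ⟨i, hi, rfl⟩ := hp
      · rw [PySem.List.mem_pyRange_one] at hi
        have h1 := congrArg Prod.fst (hpq.trans hji.symm)
        simp only at h1
        omega
      · rw [PySem.List.mem_pyRange_one] at hi
        have h2 := congrArg Prod.snd (hpq.trans hji.symm)
        simp only at h2
        omega
    · simp only [List.mem_map] at hp
      obtain ⟨i, hi, rfl⟩ := hp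
      rw [PySem.List.mem_pyRange_neg_one] at hi
      have h2 := congrArg Prod.snd (hpq.trans hji.symm)
      simp only at h2
      omega

-- min of a list with its own member appended
theorem pv_minD_dup (xs : List Int) (v : Int) (hv : v ∈ xs) :
    (PySem.List.min? (xs ++ [v]) (fun w => w)).getD 0 =
      (PySem.List.min? xs (fun w => w)).getD 0 := by
  have hne : xs ≠ [] := List.ne_nil_of_mem hv
  cases h1 : PySem.List.min? xs (fun w => w) with
  | none => exact absurd ((PySem.List.min?_eq_none_iff xs _).mp h1) hne
  | some m1 =>
    cases h2 : PySem.List.min? (xs ++ [v]) (fun w => w) with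
    | none =>
      have := (PySem.List.min?_eq_none_iff (xs ++ [v]) _).mp h2
      simp at this
    | some m2 =>
      have b2 : m2 ∈ xs := by
        rcases List.mem_append.mp (PySem.List.min?_mem h2) with h | h
        · exact h
        · simp at h; exact h ▸ hv
      have le1 : m1 ≤ m2 := PySem.List.min?_isMin h1 _ b2
      have le2 : m2 ≤ m1 := PySem.List.min?_isMin h2 _ (List.mem_append_left _ (PySem.List.min?_mem h1))
      simp
      omega

-- filling one row of the counter loop
theorem pv_fill_row_aux (i : Int) (hi : 0 ≤ i) (k : Nat) : ∀ (n : Int) (g : List (List Int)),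
    i < (g.length : Int) →
    k ≤ (PySem.List.pyGetD g i []).length →
    (PySem.List.pyRange 0 (k : Int)).foldl
      (fun (t : Int × List (List Int)) j => (t.1 + 1, pvWrite t.2 i j (t.1 + 1))) (n, g) =
    (n + k, PySem.List.pySetD g i
      (PySem.List.pyRange (n + 1) (n + k + 1) ++ (PySem.List.pyGetD g i []).drop k)) := by
  induction k with
  | zero =>
    intro n g hlt hk
    rw [PySem.List.pyRange_one_eq_nil (by omega), PySem.List.pyRange_one_eq_nil (by omega)]
    rw [PySem.List.pyGetD_eq_getElem _ _ hi hlt, PySem.List.pySetD_of_nonneg _ _ hi]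
    simp [List.set_getElem_self]
  | succ k ih =>
    intro n g hlt hk
    have hk' : k < (PySem.List.pyGetD g i []).length := by omega
    have hcast : ((k + 1 : Nat) : Int) = (k : Int) + 1 := by push_cast; ring
    rw [hcast, PySem.List.pyRange_one_succ_right (by positivity), List.foldl_append,
        ih n g hlt (by omega)]
    simp only [List.foldl_cons, List.foldl_nil]
    have hpref : (PySem.List.pyRange (n + 1) (n + (k : Int) + 1)).length = k := by
      rw [PySem.List.length_pyRange_one]; omega
    have hglen : (PySem.List.pySetD g i
        (PySem.List.pyRange (n + 1) (n + (k : Int) + 1) ++ (PySem.List.pyGetD g i []).drop k)).length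
        = g.length := PySem.List.length_pySetD _ _ _
    have hrowg : PySem.List.pyGetD (PySem.List.pySetD g i
        (PySem.List.pyRange (n + 1) (n + (k : Int) + 1) ++ (PySem.List.pyGetD g i []).drop k)) i []
        = PySem.List.pyRange (n + 1) (n + (k : Int) + 1) ++ (PySem.List.pyGetD g i []).drop k := by
      rw [PySem.List.pySetD_of_nonneg _ _ hi,
          PySem.List.pyGetD_eq_getElem _ _ hi (by rw [List.length_set]; exact hlt),
          List.getElem_set_self]
    simp only [pvWrite, hrowg]
    rw [PySem.List.pySetD_of_nonneg _ _ (by positivity : (0:Int) ≤ (k : Int)),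
        PySem.List.pySetD_of_nonneg _ _ hi, PySem.List.pySetD_of_nonneg _ _ hi,
        PySem.List.pySetD_of_nonneg _ _ hi, List.set_set]
    have htk : ((k : Int)).toNat = k := by omega
    rw [htk, List.set_append_right k _ (by omega), hpref]
    have e5 : (List.drop k (PySem.List.pyGetD g i [])).set (k - k) (n + (k:Int) + 1)
        = (n + (k:Int) + 1) :: (PySem.List.pyGetD g i []).drop (k + 1) := by
      rw [List.drop_eq_getElem_cons hk']
      simp only [Nat.sub_self, List.set_cons_zero]
    rw [e5]
    have e6 : PySem.List.pyRange (n + 1) (n + ((k:Int) + 1) + 1) =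
        PySem.List.pyRange (n + 1) (n + (k:Int) + 1) ++ [n + (k:Int) + 1] := by
      have h : n + ((k:Int) + 1) + 1 = (n + (k:Int) + 1) + 1 := by ring
      rw [h, PySem.List.pyRange_one_succ_right (by omega)]
    rw [e6]
    refine Prod.ext ?_ ?_
    · show n + (k:Int) + 1 = n + ((k:Int) + 1)
      ring
    · show g.set i.toNat _ = g.set i.toNat _
      simp [List.append_assoc]

theorem pv_fill_row (columns i n : Int) (g : List (List Int)) (hi : 0 ≤ i)
    (hilt : i < (g.length : Int))
    (hrow : (PySem.List.pyGetD g i []).length = columns.toNat) :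
    (PySem.List.pyRange 0 columns).foldl
      (fun (t : Int × List (List Int)) j => (t.1 + 1, pvWrite t.2 i j (t.1 + 1))) (n, g) =
    (n + columns.toNat, PySem.List.pySetD g i (PySem.List.pyRange (n + 1) (n + columns + 1))) := by
  by_cases hc : 0 ≤ columns
  · have hcol : columns = ((columns.toNat : Nat) : Int) := by omega
    rw [hcol] at hrow ⊢
    rw [pv_fill_row_aux i hi columns.toNat n g hilt (by omega)]
    have : (PySem.List.pyGetD g i []).drop columns.toNat = [] := by
      rw [List.drop_eq_nil_iff]; omega
    rw [this, List.append_nil]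
    simp
  · rw [PySem.List.pyRange_one_eq_nil (by omega), PySem.List.pyRange_one_eq_nil (by omega)]
    have h0 : columns.toNat = 0 := by omega
    have hrow0 : PySem.List.pyGetD g i [] = [] := by
      rw [← List.length_eq_zero_iff, hrow, h0]
    rw [PySem.List.pySetD_of_nonneg _ _ hi]
    rw [PySem.List.pyGetD_eq_getElem _ _ hi hilt] at hrow0
    refine Prod.ext ?_ ?_
    · show n = n + (columns.toNat : Int)
      rw [h0]; simp
    · show g = g.set i.toNat []
      rw [← hrow0, List.set_getElem_self]

-- the whole counter loop builds the closed-form grid, row by row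
theorem pv_fill_aux (rows columns : Int) (t : Nat) (hle : t ≤ rows.toNat) :
    (PySem.List.pyRange 0 (t : Int)).foldl
      (fun (s : Int × List (List Int)) i =>
        (PySem.List.pyRange 0 columns).foldl
          (fun (u : Int × List (List Int)) j => (u.1 + 1, pvWrite u.2 i j (u.1 + 1))) s)
      (0, List.replicate rows.toNat (List.replicate columns.toNat 0)) =
    (((columns.toNat : Int)) * t,
     (List.range t).map (fun (r : Nat) => PySem.List.pyRange ((columns.toNat : Int) * (r : Int) + 1)
        ((columns.toNat : Int) * (r : Int) + columns + 1)) ++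
      List.replicate (rows.toNat - t) (List.replicate columns.toNat 0)) := by
  induction t with
  | zero => simp [PySem.List.pyRange_one_eq_nil]
  | succ t ih =>
    have hcast : ((t + 1 : Nat) : Int) = (t : Int) + 1 := by push_cast; ring
    rw [hcast, PySem.List.pyRange_one_succ_right (by positivity), List.foldl_append,
        ih (by omega)]
    simp only [List.foldl_cons, List.foldl_nil]
    set G := (List.range t).map (fun (r : Nat) => PySem.List.pyRange ((columns.toNat : Int) * (r : Int) + 1)
        ((columns.toNat : Int) * (r : Int) + columns + 1)) ++
      List.replicate (rows.toNat - t) (List.replicate columns.toNat 0) with hG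
    have hGlen : G.length = rows.toNat := by
      rw [hG]; simp; omega
    have hfst : ((List.range t).map (fun (r : Nat) => PySem.List.pyRange ((columns.toNat : Int) * (r : Int) + 1)
        ((columns.toNat : Int) * (r : Int) + columns + 1))).length = t := by simp
    have hrowt : PySem.List.pyGetD G (t : Int) [] = List.replicate columns.toNat 0 := by
      rw [PySem.List.pyGetD_eq_getElem _ _ (by positivity) (by rw [hGlen]; omega)]
      have hidx : ((t : Int)).toNat = t := by omega
      simp only [hidx, hG]
      rw [List.getElem_append_right (le_of_eq hfst)]
      simp
    rw [pv_fill_row columns (t : Int) _ G (by positivity) (by rw [hGlen]; omega)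
        (by rw [hrowt]; simp)]
    refine Prod.ext ?_ ?_
    · show (columns.toNat : Int) * (t : Int) + (columns.toNat : Int) = (columns.toNat : Int) * ((t : Int) + 1)
      ring
    · show PySem.List.pySetD G ((t : Int)) _ = _
      rw [PySem.List.pySetD_of_nonneg _ _ (by positivity)]
      have htt : ((t : Int)).toNat = t := by omega
      simp only [htt, hG]
      rw [List.set_append_right t _ (le_of_eq hfst), hfst]
      have hrep : rows.toNat - t = (rows.toNat - (t + 1)) + 1 := by omega
      rw [hrep, List.replicate_succ, Nat.sub_self, List.set_cons_zero, List.range_succ]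
      simp [List.append_assoc]

theorem pv_grid_eq (rows columns : Int) : create_arr rows columns = pvGridAlt rows columns := by
  have harr0 : (PySem.List.pyRange 0 rows).map (fun _ => PySem.List.pyRepeat [(0 : Int)] columns) =
      List.replicate rows.toNat (List.replicate columns.toNat (0 : Int)) := by
    rw [PySem.List.pyRepeat_singleton]
    simp [List.map_const', PySem.List.length_pyRange_one]
  by_cases hr : 0 ≤ rows
  · have hrows : rows = ((rows.toNat : Nat) : Int) := by omega
    rw [create_arr]
    simp only [harr0]
    rw [show PySem.List.pyRange 0 rows = PySem.List.pyRange 0 ((rows.toNat : Nat) : Int) by rw [← hrows]]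
    rw [pv_fill_aux rows columns rows.toNat (le_refl _)]
    simp only [Nat.sub_self, List.replicate_zero, List.append_nil]
    rw [pvGridAlt, show PySem.List.pyRange 0 rows = PySem.List.pyRange 0 ((rows.toNat : Nat) : Int) by rw [← hrows],
        PySem.List.pyRange_zero_nat, List.map_map]
    apply List.map_congr_left
    intro k hk
    by_cases hc : 0 ≤ columns
    · have : ((columns.toNat : Nat) : Int) = columns := by omega
      simp only [Function.comp]
      rw [this, mul_comm]
    · have h0 : ((columns.toNat : Nat) : Int) = 0 := by omega
      simp only [Function.comp, h0, zero_mul, zero_add]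
      have hc' : columns < 0 := by omega
      rw [PySem.List.pyRange_one_eq_nil (by omega), PySem.List.pyRange_one_eq_nil (by linarith [hc'])]
  · have h0 : rows.toNat = 0 := by omega
    rw [create_arr]
    simp only [harr0]
    rw [PySem.List.pyRange_one_eq_nil (a := 0) (b := rows) (by omega), h0]
    simp [pvGridAlt, PySem.List.pyRange_one_eq_nil (a := 0) (b := rows) (by omega : rows ≤ 0)]

theorem pv_grid_wf (rows columns : Int) : pvWf rows columns (pvGridAlt rows columns) := by
  constructor
  · simp [pvGridAlt, PySem.List.length_pyRange_one]
  · intro row hrow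
    simp only [pvGridAlt, List.mem_map] at hrow
    obtain ⟨r, hr, rfl⟩ := hrow
    rw [PySem.List.length_pyRange_one]
    congr 1
    ring

theorem pv_rotate_eq (rows columns x1 y1 x2 y2 : Int) (g : List (List Int))
    (hwf : pvWf rows columns g)
    (hx1 : 1 ≤ x1) (hx : x1 < x2) (hx2 : x2 ≤ rows)
    (hy1 : 1 ≤ y1) (hy : y1 < y2) (hy2 : y2 ≤ columns) :
    rotate g x1 x2 y1 y2 =
      (((pvPath x1 y1 x2 y2).zip
          (PySem.List.slice ((pvPath x1 y1 x2 y2).map (fun p => pvRead g p.1 p.2)) (some (-1)) none ++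
           PySem.List.slice ((pvPath x1 y1 x2 y2).map (fun p => pvRead g p.1 p.2)) none (some (-1)))).foldl pvWr g,
       (PySem.List.min? ((pvPath x1 y1 x2 y2).map (fun p => pvRead g p.1 p.2)) (fun v => v)).getD 0) := by
  have hpnd : (pvPath x1 y1 x2 y2).Nodup := pv_path_nodup x1 y1 x2 y2 hx hy
  have hpin := pv_path_inG rows columns x1 y1 x2 y2 hx1 hx hx2 hy1 hy hy2
  have hped := pv_path_eq x1 y1 x2 y2 hx hy
  set c : Int × Int := (x1 - 1, y1 - 1) with hc
  set rc : Int := pvRead g (x1 - 1) (y1 - 1) with hrc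
  set Q : List (Int × Int) := pvQ x1 y1 x2 y2 with hQ
  -- A's four loops are folds of pvStep over the mapped index ranges
  have m1 : ∀ init : List (List Int) × List Int,
      (PySem.List.pyRange y1 y2).foldl (fun s i => pvStep s (x1 - 1, i)) init =
      ((PySem.List.pyRange y1 y2).map (fun i => ((x1 - 1 : Int), i))).foldl pvStep init :=
    fun init => (List.foldl_map).symm
  have m2 : ∀ init : List (List Int) × List Int,
      (PySem.List.pyRange x1 x2).foldl (fun s i => pvStep s (i, y2 - 1)) init =
      ((PySem.List.pyRange x1 x2).map (fun i => (i, (y2 - 1 : Int)))).foldl pvStep init :=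
    fun init => (List.foldl_map).symm
  have m3 : ∀ init : List (List Int) × List Int,
      (PySem.List.pyRange (y2 - 2) (y1 - 2) (-1)).foldl (fun s i => pvStep s (x2 - 1, i)) init =
      ((PySem.List.pyRange (y2 - 2) (y1 - 2) (-1)).map (fun i => ((x2 - 1 : Int), i))).foldl pvStep init :=
    fun init => (List.foldl_map).symm
  have m4 : ∀ init : List (List Int) × List Int,
      (PySem.List.pyRange (x2 - 2) (x1 - 2) (-1)).foldl (fun s i => pvStep s (i, y1 - 1)) init =
      ((PySem.List.pyRange (x2 - 2) (x1 - 2) (-1)).map (fun i => (i, (y1 - 1 : Int)))).foldl pvStep init :=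
    fun init => (List.foldl_map).symm
  have hwa : ((PySem.List.pyRange y1 y2).map (fun i => ((x1 - 1 : Int), i)) ++
      (PySem.List.pyRange x1 x2).map (fun i => (i, (y2 - 1 : Int))) ++
      (PySem.List.pyRange (y2 - 2) (y1 - 2) (-1)).map (fun i => ((x2 - 1 : Int), i)) ++
      (PySem.List.pyRange (x2 - 2) (x1 - 2) (-1)).map (fun i => (i, (y1 - 1 : Int)))) =
      Q ++ [c] := by
    rw [hQ, hc]
    rw [← pv_wa_eq x1 y1 x2 y2 hx hy]
    simp [List.append_assoc]
  have hcQ : (c :: Q).Nodup := by rw [hQ, hc, ← hped]; exact hpnd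
  have hcQ' := List.nodup_cons.mp hcQ
  have hndQC : (Q ++ [c]).Nodup := by
    rw [List.nodup_append]
    exact ⟨hcQ'.2, List.nodup_singleton _, fun a ha b hb => by
      simp only [List.mem_singleton] at hb
      exact fun h => hcQ'.1 ((h.trans hb) ▸ ha)⟩
  have hinQC : ∀ p ∈ Q ++ [c], pvInG rows columns p := by
    intro p hp
    apply hpin
    rw [hped]
    rcases List.mem_append.mp hp with h | h
    · exact List.mem_cons_of_mem _ h
    · simp only [List.mem_singleton] at h
      exact h ▸ List.mem_cons_self
  have hshift := pv_shift_fold rows columns (Q ++ [c]) g [rc] hwf (by simp) hndQC hinQC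
  -- the left-hand side is that single fold
  have lhs_eq : rotate g x1 x2 y1 y2 =
      (((Q ++ [c]).foldl pvStep (g, [rc])).1,
       (PySem.List.min? ((Q ++ [c]).foldl pvStep (g, [rc])).2 (fun w => w)).getD 0) := by
    show (let S := (PySem.List.pyRange (x2 - 2) (x1 - 2) (-1)).foldl (fun s i => pvStep s (i, y1 - 1))
            ((PySem.List.pyRange (y2 - 2) (y1 - 2) (-1)).foldl (fun s i => pvStep s (x2 - 1, i))
              ((PySem.List.pyRange x1 x2).foldl (fun s i => pvStep s (i, y2 - 1))
                ((PySem.List.pyRange y1 y2).foldl (fun s i => pvStep s (x1 - 1, i))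
                  (g, [pvRead g (x1 - 1) (y1 - 1)]))));
          (S.1, (PySem.List.min? S.2 (fun w => w)).getD 0)) = _
    simp only [m1, m2, m3, m4, ← List.foldl_append, hrc]
    rw [hwa]
  rw [lhs_eq, hshift]
  have hQne : Q ≠ [] := pvQ_ne_nil x1 y1 x2 y2
  set tv : List Int := Q.map (fun p => pvRead g p.1 p.2) with htvdef
  have htv : tv ≠ [] := by
    rw [htvdef]
    simp only [ne_eq, List.map_eq_nil_iff]
    exact hQne
  set tl : Int := tv.getLast htv with htl
  have hmapQC : (Q ++ [c]).map (fun p => pvRead g p.1 p.2) = tv ++ [rc] := by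
    rw [List.map_append]; rfl
  have hvals : (pvPath x1 y1 x2 y2).map (fun p => pvRead g p.1 p.2) = rc :: tv := by
    rw [hped, List.map_cons]
  have hsplit : tv = tv.dropLast ++ [tl] := (List.dropLast_append_getLast htv).symm
  have hlenQ : Q.length = tv.length := by rw [htvdef]; simp
  have htvpos : 0 < tv.length := List.length_pos_of_ne_nil htv
  have hlen' : Q.length = (rc :: tv.dropLast).length := by
    simp [List.length_dropLast]
    omega
  have hkeys : (((c, tl) :: Q.zip (rc :: tv.dropLast)).map (fun pc => pc.1)) = c :: Q := by
    simp only [List.map_cons]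
    congr 1
    exact List.map_fst_zip (le_of_eq hlen')
  have hrot : (Q.zip (rc :: tv.dropLast) ++ [(c, tl)]).foldl pvWr g =
      ((c, tl) :: Q.zip (rc :: tv.dropLast)).foldl pvWr g := by
    apply pv_foldl_wr_rot rows columns _ _ _ hwf
    · intro pc hpc
      apply hpin
      rw [hped]
      have : pc.1 ∈ (((c, tl) :: Q.zip (rc :: tv.dropLast)).map (fun pc => pc.1)) :=
        List.mem_map_of_mem hpc
      rwa [hkeys] at this
    · rw [hkeys]; exact hcQ
  rw [hmapQC]
  refine Prod.ext ?_ ?_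
  · -- the final grids agree
    show (List.foldl pvWr g ((Q ++ [c]).zip ([rc].getLastD 0 :: (tv ++ [rc])))) = _
    have hgl : [rc].getLastD 0 = rc := rfl
    rw [hgl, hvals, PySem.List.slice_from_neg_one, PySem.List.slice_to_neg_one,
        List.drop_length_sub_one (List.cons_ne_nil rc tv),
        List.getLast_cons htv, List.dropLast_cons_of_ne_nil htv, hped]
    have e2 : (rc :: (tv ++ [rc])) = (rc :: tv.dropLast) ++ ([tl] ++ [rc]) := by
      conv_lhs => rw [hsplit]
      simp
    rw [e2, List.zip_append hlen']
    have e3 : [c].zip ([tl] ++ [rc]) = [(c, tl)] := rfl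
    rw [e3, hrot]
    rfl
  · -- the minima agree
    show (PySem.List.min? ([rc] ++ (tv ++ [rc])) (fun w => w)).getD 0 = _
    have e4 : [rc] ++ (tv ++ [rc]) = (rc :: tv) ++ [rc] := by simp
    rw [e4, pv_minD_dup (rc :: tv) rc List.mem_cons_self, hvals]

-- the two query loops keep equal states
theorem pv_loop (rows columns : Int) (qs : List (List Int)) (ans : List Int) (g : List (List Int))
    (hq : ∀ q ∈ qs, pvQueryOK rows columns q) (hwf : pvWf rows columns g) :
    qs.foldl (fun (s : List Int × List (List Int)) querie =>
        let x1 := PySem.List.pyGetD querie 0 0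
        let y1 := PySem.List.pyGetD querie 1 0
        let x2 := PySem.List.pyGetD querie 2 0
        let y2 := PySem.List.pyGetD querie 3 0
        let r := rotate s.2 x1 x2 y1 y2
        (s.1 ++ [r.2], r.1)) (ans, g) =
    qs.foldl (fun (s : List Int × List (List Int)) querie =>
        let x1 := PySem.List.pyGetD querie 0 0
        let y1 := PySem.List.pyGetD querie 1 0
        let x2 := PySem.List.pyGetD querie 2 0
        let y2 := PySem.List.pyGetD querie 3 0
        let path := pvPath x1 y1 x2 y2
        let vals := path.map (fun p => pvRead s.2 p.1 p.2)
        let mn := (PySem.List.min? vals (fun v => v)).getD 0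
        let rotated := PySem.List.slice vals (some (-1)) none ++ PySem.List.slice vals none (some (-1))
        (s.1 ++ [mn],
         (path.zip rotated).foldl (fun g pc => pvWrite g pc.1.1 pc.1.2 pc.2) s.2)) (ans, g) := by
  induction qs generalizing ans g with
  | nil => rfl
  | cons q t ih =>
    obtain ⟨hlen, h1, h2, h3, h4, h5, h6⟩ := hq q List.mem_cons_self
    rcases q with _ | ⟨a, q⟩
    · simp at hlen
    rcases q with _ | ⟨b, q⟩
    · simp at hlen
    rcases q with _ | ⟨c, q⟩
    · simp at hlen
    rcases q with _ | ⟨d, q⟩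
    · simp at hlen
    rcases q with _ | ⟨e, q⟩
    case cons.cons.cons.cons.cons => simp at hlen
    have ha : ([a, b, c, d].getD 0 0) = a := rfl
    have hb : ([a, b, c, d].getD 1 0) = b := rfl
    have hcc : ([a, b, c, d].getD 2 0) = c := rfl
    have hd : ([a, b, c, d].getD 3 0) = d := rfl
    rw [ha] at h1 h2
    rw [hcc] at h2 h3
    rw [hb] at h4 h5
    rw [hd] at h5 h6
    have hrot := pv_rotate_eq rows columns a b c d g hwf h1 h2 h3 h4 h5 h6
    have ea : PySem.List.pyGetD ([a, b, c, d] : List Int) (0 : Int) 0 = a := rfl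
    have eb : PySem.List.pyGetD ([a, b, c, d] : List Int) (1 : Int) 0 = b := rfl
    have ec : PySem.List.pyGetD ([a, b, c, d] : List Int) (2 : Int) 0 = c := rfl
    have ed : PySem.List.pyGetD ([a, b, c, d] : List Int) (3 : Int) 0 = d := rfl
    rw [List.foldl_cons, List.foldl_cons]
    dsimp only
    rw [ea, eb, ec, ed, hrot]
    have hwf' : pvWf rows columns
        (((pvPath a b c d).zip
            (PySem.List.slice ((pvPath a b c d).map (fun p => pvRead g p.1 p.2)) (some (-1)) none ++
             PySem.List.slice ((pvPath a b c d).map (fun p => pvRead g p.1 p.2)) none (some (-1)))).foldl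
            pvWr g) := by
      apply pv_foldl_wr_wf rows columns _ _ hwf
      intro pc hpc
      exact pv_path_inG rows columns a b c d h1 h2 h3 h4 h5 h6 pc.1 (List.of_mem_zip hpc).1
    exact ih _ _ (fun q' hq' => hq q' (List.mem_cons_of_mem _ hq')) hwf'

-- ===== VERDICT (by name: the statement is the Claim_ definition above) =====
theorem solution_spec : Claim_equal_solution := by
  intro rows columns queries _ hpre
  unfold Spec_solution solution solution_alt
  rw [pv_grid_eq]
  exact congrArg Prod.fst (pv_loop rows columns queries [] (pvGridAlt rows columns) hpre (pv_grid_wf rows columns))
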